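-- pv_equiv track=rewrite | github.com/yzhao062/agent-style | packages/pypi/agent_style/review/detectors_mech.py | _inside_code_fence
-- ===== SOURCE A (Python) =====
-- def _inside_code_fence(lines: list[str], target_idx: int) -> bool:
--     """True if ``target_idx`` (0-based line index) is inside a fenced code block."""
--     fence_open = False
--     for i, line in enumerate(lines):
--         stripped = line.lstrip()
--         if stripped.startswith("```") or stripped.startswith("~~~"):
--             fence_open = not fence_open
--         if i == target_idx:
--             return fence_open
--     return False
-- ===== SOURCE B (Python) =====
-- def _fence_intervals(marks, n):
--     """Pair fence-marker line indices into half-open (open, close) intervals;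
--     an unclosed trailing fence extends to n."""
--     if not marks:
--         return []
--     if len(marks) == 1:
--         return [(marks[0], n)]
--     return [(marks[0], marks[1])] + _fence_intervals(marks[2:], n)
--
--
-- def _inside_code_fence(lines: list[str], target_idx: int) -> bool:
--     if not (0 <= target_idx < len(lines)):
--         return False
--     marks = [i for i, line in enumerate(lines)
--              if line.lstrip().startswith(("```", "~~~"))]
--     return any(a <= target_idx < b for a, b in _fence_intervals(marks, len(lines)))
-- ===== Notes on version B (the rewrite author's own statement) =====
-- stated objective: alternative
-- what changed: Replaces the toggled-boolean scan with a two-stage algorithm: collect fence-marker line indices, pair them into half-open (open, close) intervals (an unclosed trailing fence extends to the end), and test whether the target index lies in any interval.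
import Mathlib
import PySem

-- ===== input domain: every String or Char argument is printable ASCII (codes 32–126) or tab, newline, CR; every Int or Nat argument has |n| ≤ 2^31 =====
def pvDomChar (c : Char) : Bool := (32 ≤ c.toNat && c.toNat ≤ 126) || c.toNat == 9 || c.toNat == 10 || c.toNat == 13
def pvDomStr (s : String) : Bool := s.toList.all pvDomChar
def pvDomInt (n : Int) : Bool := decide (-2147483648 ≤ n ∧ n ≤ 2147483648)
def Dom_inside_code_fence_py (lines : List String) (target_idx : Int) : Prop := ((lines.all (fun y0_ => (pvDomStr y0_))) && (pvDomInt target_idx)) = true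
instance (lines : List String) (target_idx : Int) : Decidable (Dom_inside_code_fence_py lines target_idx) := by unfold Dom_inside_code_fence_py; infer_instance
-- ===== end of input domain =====

-- B replaces A's toggled-boolean scan by collecting fence-marker indices, pairing them into half-open intervals, and testing interval membership (alternative decomposition, same cost).


-- ===== PORT A =====
-- shared helper: line.lstrip().startswith("```") or line.lstrip().startswith("~~~")
def pvFenceMark (line : String) : Bool :=
  PySem.Str.startswith (PySem.Str.lstrip line) "```" || PySem.Str.startswith (PySem.Str.lstrip line) "~~~"

-- A's enumerate loop with toggled state and early return
def pvGoA : List String → Int → Int → Bool → Bool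
  | [], _, _, _ => false
  | line :: rest, i, t, fence_open =>
      let fence_open' := if pvFenceMark line then !fence_open else fence_open
      if i == t then fence_open' else pvGoA rest (i + 1) t fence_open'

def inside_code_fence_py (lines : List String) (target_idx : Int) : Bool :=
  pvGoA lines 0 target_idx false

-- ===== PORT B =====
-- _fence_intervals: pair fence-marker indices into half-open (open, close) intervals
def pvIntervals : List Int → Int → List (Int × Int)
  | [], _ => []
  | [a], n => [(a, n)]
  | a :: b :: rest, n => (a, b) :: pvIntervals rest n

-- [i for i, line in enumerate(lines) if line.lstrip().startswith(("```", "~~~"))]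
def pvMarks (lines : List String) : List Int :=
  ((PySem.List.enumerate lines 0).filter (fun p => pvFenceMark p.2)).map (·.1)

def inside_code_fence_py_alt (lines : List String) (target_idx : Int) : Bool :=
  if 0 ≤ target_idx ∧ target_idx < (lines.length : Int) then
    (pvIntervals (pvMarks lines) (lines.length : Int)).any
      (fun p => p.1 ≤ target_idx && target_idx < p.2)
  else false

-- ===== PRECONDITION & SPEC =====
def Spec_inside_code_fence_py (lines : List String) (target_idx : Int) (out : Bool) : Prop := out = inside_code_fence_py_alt lines target_idx
instance (lines : List String) (target_idx : Int) (out : Bool) : Decidable (Spec_inside_code_fence_py lines target_idx out) := by unfold Spec_inside_code_fence_py; infer_instance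

-- ===== CLAIM (what is proved, stated in full; the proofs are below) =====
def Claim_equal_inside_code_fence_py : Prop := ∀ (lines : List String) (target_idx : Int), Dom_inside_code_fence_py lines target_idx → Spec_inside_code_fence_py lines target_idx (inside_code_fence_py lines target_idx)

-- ===== LEMMAS AND PROOFS =====

-- A's loop returns false off-range and, in range, the incoming state xored with
-- the parity of the marker count of the inclusive prefix
theorem pvGoA_eq (lines : List String) (i t : Int) (fo : Bool) :
    pvGoA lines i t fo =
      if i ≤ t ∧ t < i + (lines.length : Int) then
        xor fo (((lines.take ((t - i).toNat + 1)).countP pvFenceMark) % 2 == 1)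
      else false := by
  induction lines generalizing i fo with
  | nil => simp [pvGoA]
  | cons line rest ih =>
      simp only [pvGoA, List.length_cons]
      push_cast
      by_cases hit : i = t
      · have hb : (i == t) = true := by simp [hit]
        have hc : i ≤ t ∧ t < i + ((rest.length : Int) + 1) := by omega
        rw [if_pos hb]
        rw [if_pos hc]
        have h1 : ((t - i).toNat + 1) = 1 := by omega
        rw [h1]
        simp only [List.take_succ_cons, List.take_zero, List.countP_cons, List.countP_nil]
        cases fo <;> by_cases hm : pvFenceMark line = true <;> simp [hm]
      · rw [if_neg (by simp [hit]), ih]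
        by_cases hin : i + 1 ≤ t ∧ t < i + 1 + (rest.length : Int)
        · have hc : i ≤ t ∧ t < i + ((rest.length : Int) + 1) := by omega
          rw [if_pos hin]
          rw [if_pos hc]
          have hta : (t - i).toNat + 1 = ((t - (i + 1)).toNat + 1) + 1 := by omega
          rw [hta, List.take_succ_cons, List.countP_cons]
          generalize List.countP pvFenceMark (List.take ((t - (i + 1)).toNat + 1) rest) = n
          rcases Nat.mod_two_eq_zero_or_one n with h | h <;>
            cases fo <;> by_cases hm : pvFenceMark line = true <;>
              simp [hm, Nat.add_mod, h]
        · have hc : ¬(i ≤ t ∧ t < i + ((rest.length : Int) + 1)) := by omega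
          rw [if_neg hin]
          rw [if_neg hc]

-- marks generalized over the enumerate start offset
def pvMarksGen (s : Int) (lines : List String) : List Int :=
  ((PySem.List.enumerate lines s).filter (fun p => pvFenceMark p.2)).map (·.1)

theorem pvMarksGen_cons (s : Int) (line : String) (rest : List String) :
    pvMarksGen s (line :: rest) =
      (if pvFenceMark line then [s] else []) ++ pvMarksGen (s + 1) rest := by
  simp only [pvMarksGen, PySem.List.enumerate_cons, List.filter_cons]
  by_cases h : pvFenceMark line = true <;> simp [h]

theorem pvMarksGen_mem (lines : List String) (s x : Int) (hx : x ∈ pvMarksGen s lines) :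
    s ≤ x ∧ x < s + (lines.length : Int) := by
  induction lines generalizing s with
  | nil => simp [pvMarksGen] at hx
  | cons line rest ih =>
      rw [pvMarksGen_cons] at hx
      rcases List.mem_append.mp hx with h | h
      · by_cases hm : pvFenceMark line = true
        · simp [hm] at h
          subst h; constructor <;> [omega; (simp only [List.length_cons]; push_cast; omega)]
        · simp [hm] at h
      · have := ih (s + 1) h
        simp only [List.length_cons]
        push_cast
        omega

theorem pvMarksGen_pairwise (lines : List String) (s : Int) :
    (pvMarksGen s lines).Pairwise (· < ·) := by
  induction lines generalizing s with
  | nil => simp [pvMarksGen]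
  | cons line rest ih =>
      rw [pvMarksGen_cons]
      by_cases hm : pvFenceMark line = true
      · simp only [hm, if_pos, List.singleton_append, List.pairwise_cons]
        exact ⟨fun x hx => by have := pvMarksGen_mem rest (s + 1) x hx; omega, ih (s + 1)⟩
      · simp only [hm, if_neg, Bool.false_eq_true, not_false_iff, List.nil_append]
        exact ih (s + 1)

-- counting marks ≤ s + t equals counting fence lines in the inclusive prefix
theorem pvMarksGen_count (lines : List String) (s : Int) (t : Nat) :
    (pvMarksGen s lines).countP (fun x => decide (x ≤ s + (t : Int))) =
      (lines.take (t + 1)).countP pvFenceMark := by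
  induction lines generalizing s t with
  | nil => simp [pvMarksGen]
  | cons line rest ih =>
      rw [pvMarksGen_cons, List.countP_append, List.take_succ_cons, List.countP_cons]
      have hs : List.countP (fun x => decide (x ≤ s + (t : Int))) (if pvFenceMark line then [s] else []) =
          (if pvFenceMark line then 1 else 0) := by
        by_cases hm : pvFenceMark line = true
        · have hle : s ≤ s + (t : Int) := by omega
          simp [hm, hle]
        · simp [hm]
      rw [hs]
      cases t with
      | zero =>
          have h0 : List.countP (fun x => decide (x ≤ s + ((0 : Nat) : Int))) (pvMarksGen (s + 1) rest) = 0 := by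
            rw [List.countP_eq_zero]
            intro x hx
            have := pvMarksGen_mem rest (s + 1) x hx
            simp; omega
          rw [h0]
          by_cases hm : pvFenceMark line = true <;> simp [hm]
      | succ t' =>
          have harg : (fun x => decide (x ≤ s + ((t' + 1 : Nat) : Int))) =
              (fun x => decide (x ≤ (s + 1) + (t' : Int))) := by
            funext x; simp only [decide_eq_decide]; push_cast; omega
          rw [harg, ih (s + 1) t']
          by_cases hm : pvFenceMark line = true <;> simp [hm] <;> try omega

-- interval membership over the paired marks equals oddness of the count of marks ≤ t
theorem pvIntervals_any (m : List Int) (L t : Int) :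
    m.Pairwise (· < ·) → t < L →
    ((pvIntervals m L).any (fun p => p.1 ≤ t && t < p.2)) =
      (m.countP (fun x => decide (x ≤ t)) % 2 == 1) := by
  induction m, L using pvIntervals.induct with
  | case1 n => intro _ _; simp [pvIntervals]
  | case2 a n =>
      intro _ ht
      simp only [pvIntervals, List.any_cons, List.any_nil, List.countP_cons, List.countP_nil]
      by_cases ha : a ≤ t
      · simp [ha, ht]
      · simp [ha]
  | case3 a b rest n ih =>
      intro hp ht
      simp only [List.pairwise_cons, List.mem_cons] at hp
      obtain ⟨hab, hbr, hpr⟩ := hp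
      have hbrest : ∀ x ∈ rest, b < x := hbr
      simp only [pvIntervals, List.any_cons, List.countP_cons]
      rw [ih hpr ht]
      by_cases ha : a ≤ t
      · by_cases hb : b ≤ t
        · have htb : (decide (t < b)) = false := by simp; omega
          simp only [decide_eq_true ha, Bool.true_and, htb]
          simp [decide_eq_true hb, Nat.add_mod]
          omega
        · have hcr : rest.countP (fun x => decide (x ≤ t)) = 0 := by
            rw [List.countP_eq_zero]
            intro x hx
            have h1 : a < b := hab b (Or.inl rfl)
            have h2 := hbrest x hx
            simp; omega
          have htb : t < b := by omega
          simp [ha, htb, hb, hcr]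
      · have h1 : a < b := hab b (Or.inl rfl)
        have htb : t < b := by omega
        have hbt : ¬ b ≤ t := by omega
        simp [ha, hbt]

-- interval membership over the paired marks equals oddness of the count of marks ≤ t (moved comment)
theorem inside_code_fence_py_spec : Claim_equal_inside_code_fence_py := by
  intro lines t _
  show inside_code_fence_py lines t = inside_code_fence_py_alt lines t
  rw [inside_code_fence_py, inside_code_fence_py_alt, pvGoA_eq]
  by_cases h : 0 ≤ t ∧ t < (lines.length : Int)
  · rw [if_pos (by omega), if_pos h]
    have hm : pvMarks lines = pvMarksGen 0 lines := rfl
    rw [hm, pvIntervals_any _ _ _ (pvMarksGen_pairwise lines 0) h.2]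
    have harg : (fun x => decide (x ≤ t)) = (fun x => decide (x ≤ 0 + ((t.toNat : Nat) : Int))) := by
      funext x; simp only [decide_eq_decide]; omega
    rw [harg, pvMarksGen_count lines 0 t.toNat]
    have hta : (t - 0).toNat + 1 = t.toNat + 1 := by omega
    rw [hta]
    cases hb : (((lines.take (t.toNat + 1)).countP pvFenceMark) % 2 == 1) <;> simp
  · rw [if_neg (by omega), if_neg h]
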